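-- pv_equiv track=rewrite | github.com/jearldean/AoC2023 | main.py | get_special_chars3a
-- ===== SOURCE A (Python) =====
-- def replace_many_unwanted_chars_in_string(string, a_str_of_chars_to_remove, replace_with=""):
--     for remove_this in a_str_of_chars_to_remove:
--         string = string.replace(remove_this, replace_with)
--     return string
--
-- def get_special_chars3a(puzzle_lines):
--     not_special_chars = "1234567890."
--     all_chars_used = ""
--     for line in puzzle_lines:
--         for char in line:
--             if char not in all_chars_used:
--                 all_chars_used += char
--     special_chars = replace_many_unwanted_chars_in_string(
--         string=all_chars_used, a_str_of_chars_to_remove=not_special_chars)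
--     return special_chars
-- ===== SOURCE B (Python) =====
-- def get_special_chars3a(puzzle_lines):
--     seen = set()
--     out = []
--     for line in puzzle_lines:
--         for char in line:
--             if char not in "1234567890." and char not in seen:
--                 seen.add(char)
--                 out.append(char)
--     return "".join(out)
-- ===== Notes on version B (the rewrite author's own statement) =====
-- stated objective: simpler
-- what changed: A collects every unique character in two phases (dedupe-all, then strip digits/dot by repeated str.replace); B does one filter-and-dedupe pass with a seen set, appending only non-digit/non-dot characters on first sight.
import Mathlib
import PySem

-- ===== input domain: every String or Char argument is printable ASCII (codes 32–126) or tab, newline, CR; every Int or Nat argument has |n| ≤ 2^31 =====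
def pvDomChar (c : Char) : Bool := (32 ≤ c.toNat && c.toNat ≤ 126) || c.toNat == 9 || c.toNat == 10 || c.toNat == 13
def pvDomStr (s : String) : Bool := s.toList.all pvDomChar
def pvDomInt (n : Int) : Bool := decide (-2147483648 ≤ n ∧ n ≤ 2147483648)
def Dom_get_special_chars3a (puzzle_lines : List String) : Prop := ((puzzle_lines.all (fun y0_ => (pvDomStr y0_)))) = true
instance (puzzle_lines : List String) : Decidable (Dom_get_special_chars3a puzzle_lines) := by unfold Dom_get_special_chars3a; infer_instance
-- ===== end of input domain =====

-- B replaces A's two-phase dedupe-all-then-strip-by-repeated-replace with one filter-and-dedupe pass (objective: simpler).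

-- ===== PORT A =====
-- helper of A: repeatedly str.replace each unwanted char (strings ported as List Char; String.ofList at the boundary)
def replace_many_unwanted_chars_in_string (string : List Char) (a_str_of_chars_to_remove : List Char)
    (replace_with : List Char) : List Char :=
  a_str_of_chars_to_remove.foldl (fun s remove_this => PySem.Chars.replace s [remove_this] replace_with) string

def get_special_chars3a (puzzle_lines : List String) : String :=
  let not_special_chars := "1234567890.".toList
  let all_chars_used : List Char := puzzle_lines.foldl
    (fun acc line => line.toList.foldl
      (fun acc char => if PySem.Chars.isIn [char] acc then acc else acc ++ [char]) acc) []
  String.ofList (replace_many_unwanted_chars_in_string all_chars_used not_special_chars [])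

-- ===== PORT B =====
def get_special_chars3a_alt (puzzle_lines : List String) : String :=
  let res := puzzle_lines.foldl
    (fun (st : PySem.Set Char × List Char) line => line.toList.foldl
      (fun st char =>
        if !PySem.Chars.isIn [char] "1234567890.".toList && !st.1.contains char then
          (st.1.add char, st.2 ++ [char])
        else st) st)
    (PySem.Set.ofList [], [])
  String.ofList res.2

-- ===== PRECONDITION & SPEC =====
def Spec_get_special_chars3a (puzzle_lines : List String) (out : String) : Prop := out = get_special_chars3a_alt puzzle_lines
instance (puzzle_lines : List String) (out : String) : Decidable (Spec_get_special_chars3a puzzle_lines out) := by unfold Spec_get_special_chars3a; infer_instance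

-- ===== CLAIM (what is proved, stated in full; the proofs are below) =====
def Claim_equal_get_special_chars3a : Prop := ∀ (puzzle_lines : List String), Dom_get_special_chars3a puzzle_lines → Spec_get_special_chars3a puzzle_lines (get_special_chars3a puzzle_lines)

-- ===== LEMMAS AND PROOFS =====

-- 'c in s' (Python substring test) for a single char is list membership
theorem isIn_single (c : Char) (s : List Char) : PySem.Chars.isIn [c] s = s.contains c := by
  by_cases h : c ∈ s
  · obtain ⟨u, v, rfl⟩ := List.mem_iff_append.mp h
    have hin : [c] <:+: u ++ c :: v := ⟨u, v, by simp⟩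
    rw [(PySem.Chars.isIn_iff_infix [c] (u ++ c :: v)).mpr hin]
    simp
  · have hni : ¬ ([c] <:+: s) := fun hin => h (List.singleton_sublist.mp hin.sublist)
    rw [(PySem.Chars.isIn_eq_false_iff [c] s).mpr hni]
    simp [h]

-- str.replace with a single-char pattern and empty replacement is a filter
theorem replace_go_single (b : Char) (fuel : Nat) (l acc : List Char) (h : l.length ≤ fuel) :
    PySem.Chars.replace.go [b] [] fuel l acc = acc.reverse ++ l.filter (fun c => !(c == b)) := by
  induction fuel generalizing l acc with
  | zero =>
    have : l = [] := List.length_eq_zero_iff.mp (Nat.le_zero.mp h)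
    subst this; simp [PySem.Chars.replace.go]
  | succ n ih =>
    cases l with
    | nil => simp [PySem.Chars.replace.go]
    | cons c t =>
      simp only [PySem.Chars.replace.go]
      simp only [List.length_cons] at h
      by_cases hc : c = b
      · subst hc
        have hpre : List.isPrefixOf [c] (c :: t) = true := by simp [List.isPrefixOf]
        rw [if_pos hpre]
        simp only [List.length_cons, List.length_nil, List.drop_succ_cons, List.drop_zero,
          List.reverse_nil, List.nil_append]
        rw [ih t acc (by omega)]
        simp
      · have hpre : List.isPrefixOf [b] (c :: t) = false := by
          simp [List.isPrefixOf]; exact fun e => hc e.symm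
        rw [if_neg (by simp [hpre])]
        rw [ih t (c :: acc) (by omega)]
        simp [hc]

theorem replace_single (b : Char) (s : List Char) :
    PySem.Chars.replace s [b] [] = s.filter (fun c => !(c == b)) := by
  simp only [PySem.Chars.replace, List.isEmpty_cons, Bool.false_eq_true, if_false]
  exact replace_go_single b s.length s [] (le_refl _)

-- A's replace-each-unwanted-char loop is a filter by non-membership
theorem replace_many_eq_filter (bad s : List Char) :
    replace_many_unwanted_chars_in_string s bad [] = s.filter (fun c => !bad.contains c) := by
  induction bad generalizing s with
  | nil => simp [replace_many_unwanted_chars_in_string]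
  | cons r rest ih =>
    simp only [replace_many_unwanted_chars_in_string, List.foldl_cons] at *
    rw [ih, replace_single, List.filter_filter]
    apply List.filter_congr
    intro c _
    by_cases hrc : r = c
    · subst hrc; simp
    · simp [Ne.symm hrc, Bool.and_comm]

-- "is a special (kept) char": proof-side abbreviation
def pvKeep (c : Char) : Bool := !("1234567890.".toList.contains c)

-- B's fold over one line's chars tracks A's accumulator through its pvKeep-filter
theorem inner_invariant (cs : List Char) (acc : List Char) :
    (cs.foldl (fun st char =>
        if !"1234567890.".toList.contains char && !st.1.contains char then
          (st.1.add char, st.2 ++ [char])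
        else st) (PySem.Set.ofList (acc.filter pvKeep), acc.filter pvKeep))
      = (PySem.Set.ofList ((cs.foldl
          (fun acc char => if acc.contains char then acc else acc ++ [char]) acc).filter pvKeep),
         (cs.foldl
          (fun acc char => if acc.contains char then acc else acc ++ [char]) acc).filter pvKeep) := by
  induction cs generalizing acc with
  | nil => rfl
  | cons c t ih =>
    simp only [List.foldl_cons]
    cases hbad : "1234567890.".toList.contains c with
    | true =>
      have hkf : pvKeep c = false := by simp only [pvKeep, hbad, Bool.not_true]
      rw [if_neg (by simp)]
      cases hmem : acc.contains c with
      | true => rw [if_pos rfl]; exact ih acc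
      | false =>
        rw [if_neg (fun h => Bool.false_ne_true h)]
        have hf : (acc ++ [c]).filter pvKeep = acc.filter pvKeep := by
          simp [List.filter_append, hkf]
        have := ih (acc ++ [c])
        rw [hf] at this
        exact this
    | false =>
      have hkeep : pvKeep c = true := by simp only [pvKeep, hbad, Bool.not_false]
      cases hmem : acc.contains c with
      | true =>
        have hcmem : c ∈ acc := by simpa using hmem
        rw [if_neg (by simp; exact ⟨hcmem, hkeep⟩)]
        rw [if_pos rfl]
        exact ih acc
      | false =>
        have hnot : c ∉ acc := by simpa using hmem
        rw [if_pos (by simp; exact Or.inl hnot)]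
        rw [if_neg (fun h => Bool.false_ne_true h)]
        have hf : (acc ++ [c]).filter pvKeep = acc.filter pvKeep ++ [c] := by
          simp [List.filter_append, hkeep]
        have := ih (acc ++ [c])
        rw [hf, PySem.Set.ofList_append_singleton] at this
        exact this

-- B's whole fold over the lines tracks A's accumulator
theorem outer_invariant (lines : List String) (acc : List Char) :
    (lines.foldl (fun st line => line.toList.foldl
        (fun st char =>
          if !"1234567890.".toList.contains char && !st.1.contains char then
            (st.1.add char, st.2 ++ [char])
          else st) st) (PySem.Set.ofList (acc.filter pvKeep), acc.filter pvKeep))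
      = (PySem.Set.ofList ((lines.foldl (fun acc line => line.toList.foldl
            (fun acc char => if acc.contains char then acc else acc ++ [char]) acc) acc).filter pvKeep),
         (lines.foldl (fun acc line => line.toList.foldl
            (fun acc char => if acc.contains char then acc else acc ++ [char]) acc) acc).filter pvKeep) := by
  induction lines generalizing acc with
  | nil => rfl
  | cons l t ih =>
    simp only [List.foldl_cons]
    rw [inner_invariant l.toList acc]
    exact ih _

-- ===== VERDICT (by name: the statement is the Claim_ definition above) =====
theorem get_special_chars3a_spec : Claim_equal_get_special_chars3a := by
  intro puzzle_lines _
  unfold Spec_get_special_chars3a get_special_chars3a get_special_chars3a_alt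
  simp only [isIn_single]
  have h := outer_invariant puzzle_lines []
  simp only [List.filter_nil] at h
  rw [h, replace_many_eq_filter]
  rfl
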